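-- pv_equiv track=rewrite | github.com/johnmathews/sre-assistant | src/agent/tools/proxmox.py | _format_guest_config
-- ===== SOURCE A (Python) =====
-- def _format_guest_config(vmid: int, config: dict[str, object]) -> str:
--     """Format PVE guest configuration into a readable string."""
--     name = config.get("name", "unnamed")
--     lines: list[str] = [f"Configuration for {vmid} ({name}):\n"]
--
--     # Group keys by category
--     compute_keys = ("cores", "sockets", "memory", "balloon", "cpu", "numa", "vcpus")
--     disk_prefixes = ("scsi", "virtio", "ide", "sata", "efidisk", "rootfs", "mp")
--     net_prefix = "net"
--     boot_keys = ("boot", "onboot", "startup", "agent", "ostype")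
--
--     compute: list[str] = []
--     disks: list[str] = []
--     networks: list[str] = []
--     boot: list[str] = []
--     other: list[str] = []
--
--     for key, value in sorted(config.items()):
--         if key.startswith("digest") or key.startswith("_"):
--             continue
--         entry = f"  {key}: {value}"
--         if key in compute_keys:
--             compute.append(entry)
--         elif any(key.startswith(p) for p in disk_prefixes):
--             disks.append(entry)
--         elif key.startswith(net_prefix):
--             networks.append(entry)
--         elif key in boot_keys:
--             boot.append(entry)
--         else:
--             other.append(entry)
--
--     if compute:
--         lines.append("Compute:")
--         lines.extend(compute)
--     if disks:
--         lines.append("Disks:")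
--         lines.extend(disks)
--     if networks:
--         lines.append("Network:")
--         lines.extend(networks)
--     if boot:
--         lines.append("Boot / OS:")
--         lines.extend(boot)
--     if other:
--         lines.append("Other:")
--         lines.extend(other)
--
--     return "\n".join(lines)
-- ===== SOURCE B (Python) =====
-- def _format_guest_config(vmid: int, config: dict[str, object]) -> str:
--     """Format PVE guest configuration into a readable string."""
--     headers = ("Compute:", "Disks:", "Network:", "Boot / OS:", "Other:")
--
--     def rank(key: str) -> int:
--         if key in ("cores", "sockets", "memory", "balloon", "cpu", "numa", "vcpus"):
--             return 0
--         if any(key.startswith(p) for p in ("scsi", "virtio", "ide", "sata", "efidisk", "rootfs", "mp")):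
--             return 1
--         if key.startswith("net"):
--             return 2
--         if key in ("boot", "onboot", "startup", "agent", "ostype"):
--             return 3
--         return 4
--
--     name = config.get("name", "unnamed")
--     kept = [(k, v) for k, v in config.items() if not (k.startswith("digest") or k.startswith("_"))]
--     lines = [f"Configuration for {vmid} ({name}):\n"]
--     cur = -1
--     for k, v in sorted(kept, key=lambda kv: (rank(kv[0]), kv[0])):
--         r = rank(k)
--         if r != cur:
--             lines.append(headers[r])
--             cur = r
--         lines.append(f"  {k}: {v}")
--     return "\n".join(lines)
-- ===== Notes on version B (the rewrite author's own statement) =====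
-- stated objective: alternative
-- what changed: Instead of partitioning the sorted items into five category lists and concatenating header+list blocks, B computes a numeric category rank per key, sorts kept items once by (rank, key), and emits the output in a single pass that inserts a header whenever the rank changes.
import Mathlib
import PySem

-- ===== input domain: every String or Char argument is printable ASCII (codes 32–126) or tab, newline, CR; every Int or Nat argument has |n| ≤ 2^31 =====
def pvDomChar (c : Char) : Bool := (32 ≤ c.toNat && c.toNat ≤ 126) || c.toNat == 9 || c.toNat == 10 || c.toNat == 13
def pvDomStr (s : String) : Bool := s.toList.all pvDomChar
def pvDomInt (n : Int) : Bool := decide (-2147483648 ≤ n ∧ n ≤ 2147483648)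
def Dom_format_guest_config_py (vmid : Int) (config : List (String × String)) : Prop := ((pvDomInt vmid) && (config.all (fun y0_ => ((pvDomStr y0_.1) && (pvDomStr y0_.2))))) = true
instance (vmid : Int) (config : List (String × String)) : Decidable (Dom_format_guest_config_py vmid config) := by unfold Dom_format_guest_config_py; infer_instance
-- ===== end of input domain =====

-- B replaces A's five category buckets by a numeric rank per key, one sort by (rank, key)
-- and a single emit pass inserting a header when the rank changes (objective: alternative).

-- ===== PORT A =====
def aComputeKeys : List String := ["cores", "sockets", "memory", "balloon", "cpu", "numa", "vcpus"]
def aDiskPrefixes : List String := ["scsi", "virtio", "ide", "sata", "efidisk", "rootfs", "mp"]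
def aBootKeys : List String := ["boot", "onboot", "startup", "agent", "ostype"]

-- body of A's classification loop: skip digest/_ keys, append the entry to its bucket
def aStep (acc : List String × List String × List String × List String × List String)
    (p : String × String) : List String × List String × List String × List String × List String :=
  if PySem.Str.startswith p.1 "digest" || PySem.Str.startswith p.1 "_" then acc
  else
    let entry := "  " ++ p.1 ++ ": " ++ p.2
    if aComputeKeys.contains p.1 then
      (acc.1 ++ [entry], acc.2.1, acc.2.2.1, acc.2.2.2.1, acc.2.2.2.2)
    else if aDiskPrefixes.any (fun pre => PySem.Str.startswith p.1 pre) then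
      (acc.1, acc.2.1 ++ [entry], acc.2.2.1, acc.2.2.2.1, acc.2.2.2.2)
    else if PySem.Str.startswith p.1 "net" then
      (acc.1, acc.2.1, acc.2.2.1 ++ [entry], acc.2.2.2.1, acc.2.2.2.2)
    else if aBootKeys.contains p.1 then
      (acc.1, acc.2.1, acc.2.2.1, acc.2.2.2.1 ++ [entry], acc.2.2.2.2)
    else
      (acc.1, acc.2.1, acc.2.2.1, acc.2.2.2.1, acc.2.2.2.2 ++ [entry])

def format_guest_config_py (vmid : Int) (config : List (String × String)) : String :=
  let d := PySem.Dict.ofList config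
  let name := d.getD "name" "unnamed"
  let acc := (PySem.List.sorted2 d.items (fun p => p.1) (fun p => p.2) false).foldl aStep ([], [], [], [], [])
  let lines : List String := ["Configuration for " ++ PySem.Int.toStr vmid ++ " (" ++ name ++ "):\n"]
  let lines := if acc.1.isEmpty then lines else lines ++ ["Compute:"] ++ acc.1
  let lines := if acc.2.1.isEmpty then lines else lines ++ ["Disks:"] ++ acc.2.1
  let lines := if acc.2.2.1.isEmpty then lines else lines ++ ["Network:"] ++ acc.2.2.1
  let lines := if acc.2.2.2.1.isEmpty then lines else lines ++ ["Boot / OS:"] ++ acc.2.2.2.1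
  let lines := if acc.2.2.2.2.isEmpty then lines else lines ++ ["Other:"] ++ acc.2.2.2.2
  PySem.Str.join "\n" lines

-- ===== PORT B =====
def bComputeKeys : List String := ["cores", "sockets", "memory", "balloon", "cpu", "numa", "vcpus"]
def bDiskPrefixes : List String := ["scsi", "virtio", "ide", "sata", "efidisk", "rootfs", "mp"]
def bBootKeys : List String := ["boot", "onboot", "startup", "agent", "ostype"]
def bHeaders : List String := ["Compute:", "Disks:", "Network:", "Boot / OS:", "Other:"]

-- B's rank(key): category number 0..4, same priority order as A's chain
def bRank (k : String) : Int :=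
  if bComputeKeys.contains k then 0
  else if bDiskPrefixes.any (fun pre => PySem.Str.startswith k pre) then 1
  else if PySem.Str.startswith k "net" then 2
  else if bBootKeys.contains k then 3
  else 4

def bKeep (p : String × String) : Bool :=
  !(PySem.Str.startswith p.1 "digest" || PySem.Str.startswith p.1 "_")

-- body of B's emit loop; headers[r] is pyGetD (r is always 0..4, in range)
def bStep (st : List String × Int) (p : String × String) : List String × Int :=
  let r := bRank p.1
  let st' := if r ≠ st.2 then (st.1 ++ [PySem.List.pyGetD bHeaders r ""], r) else st
  (st'.1 ++ ["  " ++ p.1 ++ ": " ++ p.2], st'.2)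

def format_guest_config_py_alt (vmid : Int) (config : List (String × String)) : String :=
  let d := PySem.Dict.ofList config
  let name := d.getD "name" "unnamed"
  let kept := d.items.filter bKeep
  let s := PySem.List.sorted2 kept (fun p => bRank p.1) (fun p => p.1) false
  let res := s.foldl bStep (["Configuration for " ++ PySem.Int.toStr vmid ++ " (" ++ name ++ "):\n"], -1)
  PySem.Str.join "\n" res.1

-- ===== PRECONDITION & SPEC =====
def Spec_format_guest_config_py (vmid : Int) (config : List (String × String)) (out : String) : Prop := out = format_guest_config_py_alt vmid config
instance (vmid : Int) (config : List (String × String)) (out : String) : Decidable (Spec_format_guest_config_py vmid config out) := by unfold Spec_format_guest_config_py; infer_instance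

-- ===== CLAIM (what is proved, stated in full; the proofs are below) =====
def Claim_equal_format_guest_config_py : Prop := ∀ (vmid : Int) (config : List (String × String)), Dom_format_guest_config_py vmid config → Spec_format_guest_config_py vmid config (format_guest_config_py vmid config)

-- ===== LEMMAS AND PROOFS =====

-- entry string of an item
def pvEntry (p : String × String) : String := "  " ++ p.1 ++ ": " ++ p.2

-- the kept items of l whose rank is r
def pvGrp (r : Int) (l : List (String × String)) : List (String × String) :=
  l.filter (fun p => bKeep p && bRank p.1 == r)

-- the output block of category r
def pvBlk (r : Int) (g : List (String × String)) : List String :=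
  if g.isEmpty = true then [] else PySem.List.pyGetD bHeaders r "" :: g.map pvEntry

lemma bRank_mem (k : String) :
    bRank k = 0 ∨ bRank k = 1 ∨ bRank k = 2 ∨ bRank k = 3 ∨ bRank k = 4 := by
  unfold bRank; split_ifs <;> simp

-- A's if/elif chain appends the entry to exactly the bucket numbered bRank p.1
set_option maxHeartbeats 1000000 in
lemma aStep_eq (acc : List String × List String × List String × List String × List String)
    (p : String × String) : aStep acc p =
    if bKeep p = true then
      (if bRank p.1 = 0 then (acc.1 ++ [pvEntry p], acc.2.1, acc.2.2.1, acc.2.2.2.1, acc.2.2.2.2)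
       else if bRank p.1 = 1 then (acc.1, acc.2.1 ++ [pvEntry p], acc.2.2.1, acc.2.2.2.1, acc.2.2.2.2)
       else if bRank p.1 = 2 then (acc.1, acc.2.1, acc.2.2.1 ++ [pvEntry p], acc.2.2.2.1, acc.2.2.2.2)
       else if bRank p.1 = 3 then (acc.1, acc.2.1, acc.2.2.1, acc.2.2.2.1 ++ [pvEntry p], acc.2.2.2.2)
       else (acc.1, acc.2.1, acc.2.2.1, acc.2.2.2.1, acc.2.2.2.2 ++ [pvEntry p]))
    else acc := by
  have hac : aComputeKeys = bComputeKeys := rfl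
  have had : aDiskPrefixes = bDiskPrefixes := rfl
  have hab : aBootKeys = bBootKeys := rfl
  by_cases hd : PySem.Chars.startswith p.1.toList ['d','i','g','e','s','t'] = true
  · simp [aStep, bKeep, hd]
  · by_cases hu : PySem.Chars.startswith p.1.toList ['_'] = true
    · simp [aStep, bKeep, hu]
    · by_cases c1 : p.1 ∈ bComputeKeys
      · simp [aStep, bKeep, bRank, pvEntry, hd, hu, c1, hac, had, hab]
      · by_cases c2 : ∃ x ∈ bDiskPrefixes, PySem.Chars.startswith p.1.toList x.toList = true
        · simp [aStep, bKeep, bRank, pvEntry, hd, hu, c1, c2, hac, had, hab]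
        · by_cases c3 : PySem.Chars.startswith p.1.toList ['n','e','t'] = true
          · simp [aStep, bKeep, bRank, pvEntry, hd, hu, c1, c2, c3, hac, had, hab]
          · by_cases c4 : p.1 ∈ bBootKeys
            · simp [aStep, bKeep, bRank, pvEntry, hd, hu, c1, c2, c3, c4, hac, had, hab]
            · simp [aStep, bKeep, bRank, pvEntry, hd, hu, c1, c2, c3, c4, hac, had, hab]

-- A's bucket loop computes the per-rank groups
lemma foldA (l : List (String × String)) (c d n b o : List String) :
    l.foldl aStep (c, d, n, b, o) =
      (c ++ (pvGrp 0 l).map pvEntry, d ++ (pvGrp 1 l).map pvEntry,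
       n ++ (pvGrp 2 l).map pvEntry, b ++ (pvGrp 3 l).map pvEntry,
       o ++ (pvGrp 4 l).map pvEntry) := by
  induction l generalizing c d n b o with
  | nil => simp [pvGrp]
  | cons x l ih =>
    rw [List.foldl_cons, aStep_eq]
    by_cases hk : bKeep x = true
    · rcases bRank_mem x.1 with hr | hr | hr | hr | hr <;>
        simp [hk, hr, pvGrp, List.filter_cons, ih]
    · have hk' : bKeep x = false := eq_false_of_ne_true hk
      simp [hk', pvGrp, List.filter_cons, ih]

-- sorted2 with keys (k1, k2) is sorted with the single lexicographic key, stated at the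
-- two instantiations the ports use
lemma sorted2_eq_sorted_kv (xs : List (String × String)) :
    PySem.List.sorted2 xs (fun p => p.1) (fun p => p.2) false
      = PySem.List.sorted xs (fun p => toLex (p.1, p.2)) false := by
  simp only [PySem.List.sorted2, PySem.List.sorted_eq_foldl_insertBy]
  have h : (fun (a b : String × String) => decide (a.1 < b.1) || (!decide (b.1 < a.1) && decide (a.2 < b.2)))
      = fun a b => decide (toLex (a.1, a.2) < toLex (b.1, b.2)) := by
    funext a b
    rcases lt_trichotomy a.1 b.1 with h1 | h1 | h1
    · simp [h1, lt_asymm h1, Prod.Lex.lt_iff]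
    · have h2 : ¬ a.1 < b.1 := by rw [h1]; exact lt_irrefl _
      have h3 : ¬ b.1 < a.1 := by rw [h1]; exact lt_irrefl _
      simp [h1, h2, h3, Prod.Lex.lt_iff]
    · have h2 : ¬ a.1 < b.1 := lt_asymm h1
      simp [h1, h2, ne_of_gt h1, Prod.Lex.lt_iff]
  simp only [if_neg (by decide : ¬ (false = true))]
  rw [h]

lemma sorted2_eq_sorted_rk (xs : List (String × String)) :
    PySem.List.sorted2 xs (fun p => bRank p.1) (fun p => p.1) false
      = PySem.List.sorted xs (fun p => toLex (bRank p.1, p.1)) false := by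
  simp only [PySem.List.sorted2, PySem.List.sorted_eq_foldl_insertBy]
  have h : (fun (a b : String × String) => decide (bRank a.1 < bRank b.1) || (!decide (bRank b.1 < bRank a.1) && decide (a.1 < b.1)))
      = fun a b => decide (toLex (bRank a.1, a.1) < toLex (bRank b.1, b.1)) := by
    funext a b
    rcases lt_trichotomy (bRank a.1) (bRank b.1) with h1 | h1 | h1
    · simp [h1, lt_asymm h1, Prod.Lex.lt_iff]
    · have h2 : ¬ bRank a.1 < bRank b.1 := by omega
      have h3 : ¬ bRank b.1 < bRank a.1 := by omega
      simp [h1, h2, h3, Prod.Lex.lt_iff]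
    · have h2 : ¬ bRank a.1 < bRank b.1 := by omega
      have h4 : bRank a.1 ≠ bRank b.1 := by omega
      simp [h1, h2, h4, Prod.Lex.lt_iff]
  simp only [if_neg (by decide : ¬ (false = true))]
  rw [h]

lemma pvGrp_mem {r : Int} {l : List (String × String)} {p : String × String}
    (hp : p ∈ pvGrp r l) : bKeep p = true ∧ bRank p.1 = r := by
  simp only [pvGrp, List.mem_filter, Bool.and_eq_true, beq_iff_eq] at hp
  exact hp.2

lemma pvGrp_cons_self {x : String × String} {l : List (String × String)} {r : Int}
    (hk : bKeep x = true) (hr : bRank x.1 = r) : pvGrp r (x :: l) = x :: pvGrp r l := by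
  simp [pvGrp, List.filter_cons, hk, hr]

lemma pvGrp_cons_ne {x : String × String} {l : List (String × String)} {r : Int}
    (h : ¬ (bKeep x = true ∧ bRank x.1 = r)) : pvGrp r (x :: l) = pvGrp r l := by
  have hc : (bKeep x && (bRank x.1 == r)) = false := by
    cases h' : bKeep x with
    | false => simp [h']
    | true =>
      simp only [h', Bool.true_and, beq_eq_false_iff_ne, ne_eq]
      exact fun hh => h ⟨h', hh⟩
  simp [pvGrp, List.filter_cons, hc]

-- each item lands in exactly one group: the five groups are a permutation of the kept items
lemma partition5 (l : List (String × String)) :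
    (pvGrp 0 l ++ (pvGrp 1 l ++ (pvGrp 2 l ++ (pvGrp 3 l ++ pvGrp 4 l)))).Perm
      (l.filter bKeep) := by
  induction l with
  | nil => simp [pvGrp]
  | cons x l ih =>
    by_cases hk : bKeep x = true
    · have hf : (x :: l).filter bKeep = x :: l.filter bKeep := by
        simp [List.filter_cons, hk]
      rw [hf]
      rcases bRank_mem x.1 with hr | hr | hr | hr | hr
      · rw [pvGrp_cons_self hk hr,
          pvGrp_cons_ne (by simp [hr]), pvGrp_cons_ne (by simp [hr]),
          pvGrp_cons_ne (by simp [hr]), pvGrp_cons_ne (by simp [hr])]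
        simp only [List.cons_append]
        exact ih.cons x
      · rw [pvGrp_cons_self hk hr,
          pvGrp_cons_ne (by simp [hr]), pvGrp_cons_ne (by simp [hr]),
          pvGrp_cons_ne (by simp [hr]), pvGrp_cons_ne (by simp [hr])]
        simp only [List.cons_append]
        exact List.perm_middle.trans (ih.cons x)
      · rw [pvGrp_cons_self hk hr,
          pvGrp_cons_ne (by simp [hr]), pvGrp_cons_ne (by simp [hr]),
          pvGrp_cons_ne (by simp [hr]), pvGrp_cons_ne (by simp [hr])]
        simp only [List.cons_append]
        exact ((List.perm_middle.append_left _).trans List.perm_middle).trans (ih.cons x)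
      · rw [pvGrp_cons_self hk hr,
          pvGrp_cons_ne (by simp [hr]), pvGrp_cons_ne (by simp [hr]),
          pvGrp_cons_ne (by simp [hr]), pvGrp_cons_ne (by simp [hr])]
        simp only [List.cons_append]
        exact (((List.perm_middle.append_left _).append_left _).trans
          ((List.perm_middle.append_left _).trans List.perm_middle)).trans (ih.cons x)
      · rw [pvGrp_cons_self hk hr,
          pvGrp_cons_ne (by simp [hr]), pvGrp_cons_ne (by simp [hr]),
          pvGrp_cons_ne (by simp [hr]), pvGrp_cons_ne (by simp [hr])]
        exact ((((List.perm_middle.append_left _).append_left _).append_left _).trans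
          (((List.perm_middle.append_left _).append_left _).trans
            ((List.perm_middle.append_left _).trans List.perm_middle))).trans (ih.cons x)
    · have hk' : bKeep x = false := eq_false_of_ne_true hk
      have hf : (x :: l).filter bKeep = l.filter bKeep := by
        simp [List.filter_cons, hk']
      rw [hf, pvGrp_cons_ne (by simp [hk']), pvGrp_cons_ne (by simp [hk']),
        pvGrp_cons_ne (by simp [hk']), pvGrp_cons_ne (by simp [hk']),
        pvGrp_cons_ne (by simp [hk'])]
      exact ih

-- B's emit loop over a single group whose current rank is already r appends only entries
lemma emit_same (g : List (String × String)) (r : Int)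
    (hg : ∀ p ∈ g, bRank p.1 = r) (lines : List String) :
    g.foldl bStep (lines, r) = (lines ++ g.map pvEntry, r) := by
  induction g generalizing lines with
  | nil => simp
  | cons x g ih =>
    have hx := hg x (List.mem_cons_self ..)
    rw [List.foldl_cons]
    have hstep : bStep (lines, r) x = (lines ++ [pvEntry x], r) := by
      simp [bStep, hx, pvEntry]
    rw [hstep, ih (fun p hp => hg p (List.mem_cons_of_mem _ hp))]
    simp

-- B's emit loop over a group of rank r, entered with a different current rank
lemma emit_grp (g : List (String × String)) (r cur : Int)
    (hg : ∀ p ∈ g, bRank p.1 = r) (hne : cur ≠ r) (lines : List String) :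
    g.foldl bStep (lines, cur) =
      (lines ++ pvBlk r g, if g.isEmpty = true then cur else r) := by
  cases g with
  | nil => simp [pvBlk]
  | cons x g =>
    have hx := hg x (List.mem_cons_self ..)
    rw [List.foldl_cons]
    have hstep : bStep (lines, cur) x
        = (lines ++ [PySem.List.pyGetD bHeaders r "", pvEntry x], r) := by
      simp [bStep, hx, pvEntry, (Ne.symm hne)]
    rw [hstep, emit_same g r (fun p hp => hg p (List.mem_cons_of_mem _ hp))]
    simp [pvBlk]

-- the whole emit pass over the concatenated groups
lemma emit_chain (g0 g1 g2 g3 g4 : List (String × String))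
    (h0 : ∀ p ∈ g0, bRank p.1 = 0) (h1 : ∀ p ∈ g1, bRank p.1 = 1)
    (h2 : ∀ p ∈ g2, bRank p.1 = 2) (h3 : ∀ p ∈ g3, bRank p.1 = 3)
    (h4 : ∀ p ∈ g4, bRank p.1 = 4) (lines : List String) :
    ((g0 ++ (g1 ++ (g2 ++ (g3 ++ g4)))).foldl bStep (lines, -1)).1 =
      lines ++ pvBlk 0 g0 ++ pvBlk 1 g1 ++ pvBlk 2 g2 ++ pvBlk 3 g3 ++ pvBlk 4 g4 := by
  rw [List.foldl_append, List.foldl_append, List.foldl_append, List.foldl_append]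
  rw [emit_grp g0 0 (-1) h0 (by decide) lines]
  rw [emit_grp g1 1 (if g0.isEmpty = true then (-1 : Int) else 0) h1
    (by split_ifs <;> decide) _]
  rw [emit_grp g2 2 (if g1.isEmpty = true then (if g0.isEmpty = true then (-1 : Int) else 0) else 1) h2
    (by split_ifs <;> decide) _]
  rw [emit_grp g3 3 (if g2.isEmpty = true then (if g1.isEmpty = true then (if g0.isEmpty = true then (-1 : Int) else 0) else 1) else 2) h3
    (by split_ifs <;> decide) _]
  rw [emit_grp g4 4 (if g3.isEmpty = true then (if g2.isEmpty = true then (if g1.isEmpty = true then (if g0.isEmpty = true then (-1 : Int) else 0) else 1) else 2) else 3) h4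
    (by split_ifs <;> decide) _]

-- ===== VERDICT (by name: the statement is the Claim_ definition above) =====
theorem format_guest_config_py_spec : Claim_equal_format_guest_config_py := by
  intro vmid config _
  unfold Spec_format_guest_config_py
  simp only [format_guest_config_py, format_guest_config_py_alt]
  set items := (PySem.Dict.ofList config).items with hitems
  set s1 := PySem.List.sorted2 items (fun p => p.1) (fun p => p.2) false with hs1def
  have hnd : (items.map Prod.fst).Nodup := by
    have h := PySem.Dict.nodup_keys_ofList (κ := String) (ν := String) config
    simpa [PySem.Dict.keys, hitems] using h
  have hperm : s1.Perm items := by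
    have h := PySem.List.sorted2_perm items (fun p => p.1) (fun p => p.2) false
    rw [← hs1def] at h
    exact h
  have hndk : (s1.map Prod.fst).Nodup := ((hperm.map Prod.fst).nodup_iff).mpr hnd
  have hpair1 : s1.Pairwise (fun p q => toLex (p.1, p.2) ≤ toLex (q.1, q.2)) := by
    rw [hs1def, sorted2_eq_sorted_kv]
    exact PySem.List.sorted_pairwise _ _
  have hpairne : s1.Pairwise (fun p q => p.1 ≠ q.1) := by
    simpa [List.Nodup, List.pairwise_map] using hndk
  have hpair : s1.Pairwise (fun p q => p.1 < q.1) := by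
    refine (hpair1.and hpairne).imp ?_
    rintro a b ⟨hle, hne⟩
    have h := Prod.Lex.le_iff.mp hle
    simp only [ofLex_toLex] at h
    rcases h with h | ⟨h, _⟩
    · exact h
    · exact absurd h hne
  have hgp : ∀ r : Int, (pvGrp r s1).Pairwise
      (fun p q => toLex (bRank p.1, p.1) < toLex (bRank q.1, q.1)) := by
    intro r
    have hsub : (pvGrp r s1).Pairwise (fun p q => p.1 < q.1) :=
      hpair.sublist List.filter_sublist
    refine List.Pairwise.imp_of_mem ?_ hsub
    intro a b ha hb hlt
    apply Prod.Lex.lt_iff.mpr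
    simp only [ofLex_toLex]
    exact Or.inr ⟨by rw [(pvGrp_mem ha).2, (pvGrp_mem hb).2], hlt⟩
  have hcross : ∀ (r r' : Int), r < r' → ∀ p ∈ pvGrp r s1, ∀ q ∈ pvGrp r' s1,
      toLex (bRank p.1, p.1) < toLex (bRank q.1, q.1) := by
    intro r r' hrr p hp q hq
    apply Prod.Lex.lt_iff.mpr
    simp only [ofLex_toLex]
    exact Or.inl (by rw [(pvGrp_mem hp).2, (pvGrp_mem hq).2]; exact hrr)
  have hs2 : PySem.List.sorted2 (items.filter bKeep) (fun p => bRank p.1) (fun p => p.1) false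
      = pvGrp 0 s1 ++ (pvGrp 1 s1 ++ (pvGrp 2 s1 ++ (pvGrp 3 s1 ++ pvGrp 4 s1))) := by
    rw [sorted2_eq_sorted_rk]
    refine PySem.List.sorted_eq_of_perm_of_pairwise_lt _ _ _ ?_ ?_
    · exact (partition5 s1).trans (hperm.filter _)
    · refine List.pairwise_append.mpr ⟨hgp 0, List.pairwise_append.mpr ⟨hgp 1,
        List.pairwise_append.mpr ⟨hgp 2, List.pairwise_append.mpr
          ⟨hgp 3, hgp 4, hcross 3 4 (by decide)⟩, ?_⟩, ?_⟩, ?_⟩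
      · intro a ha b hb
        rcases List.mem_append.mp hb with hb | hb
        · exact hcross 2 3 (by decide) a ha b hb
        · exact hcross 2 4 (by decide) a ha b hb
      · intro a ha b hb
        rcases List.mem_append.mp hb with hb | hb'
        · exact hcross 1 2 (by decide) a ha b hb
        · rcases List.mem_append.mp hb' with hb | hb
          · exact hcross 1 3 (by decide) a ha b hb
          · exact hcross 1 4 (by decide) a ha b hb
      · intro a ha b hb
        rcases List.mem_append.mp hb with hb | hb'
        · exact hcross 0 1 (by decide) a ha b hb
        · rcases List.mem_append.mp hb' with hb | hb''
          · exact hcross 0 2 (by decide) a ha b hb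
          · rcases List.mem_append.mp hb'' with hb | hb
            · exact hcross 0 3 (by decide) a ha b hb
            · exact hcross 0 4 (by decide) a ha b hb
  rw [foldA, hs2,
    emit_chain (pvGrp 0 s1) (pvGrp 1 s1) (pvGrp 2 s1) (pvGrp 3 s1) (pvGrp 4 s1)
      (fun p hp => (pvGrp_mem hp).2) (fun p hp => (pvGrp_mem hp).2)
      (fun p hp => (pvGrp_mem hp).2) (fun p hp => (pvGrp_mem hp).2)
      (fun p hp => (pvGrp_mem hp).2) _]
  congr 1
  have hH0 : PySem.List.pyGetD bHeaders (0 : Int) "" = "Compute:" := rfl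
  have hH1 : PySem.List.pyGetD bHeaders (1 : Int) "" = "Disks:" := rfl
  have hH2 : PySem.List.pyGetD bHeaders (2 : Int) "" = "Network:" := rfl
  have hH3 : PySem.List.pyGetD bHeaders (3 : Int) "" = "Boot / OS:" := rfl
  have hH4 : PySem.List.pyGetD bHeaders (4 : Int) "" = "Other:" := rfl
  by_cases h0 : pvGrp 0 s1 = [] <;> by_cases h1 : pvGrp 1 s1 = [] <;>
    by_cases h2 : pvGrp 2 s1 = [] <;> by_cases h3 : pvGrp 3 s1 = [] <;>
    by_cases h4 : pvGrp 4 s1 = [] <;>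
    simp [pvBlk, h0, h1, h2, h3, h4, hH0, hH1, hH2, hH3, hH4, List.append_assoc]
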